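-- pv_equiv track=rewrite | github.com/angad-k/Cryptopals-set1-solution | chall6RevisionPart2(challenge6).py | getBestXOR
-- ===== SOURCE A (Python) =====
-- def XORtwoSTRs(a, b):
--     string3 = ""
--     for i in range(0, len(a)):
--         string3 += chr(ord(a[i])^ord(b[i]))
--     return(string3)
--
-- def scorer(argument):
--     switcher = {
--         'E' : 12.0,
--         'T' : 9.10,
--         'A' : 8.12,
--         'O' : 7.68,
--         'I' : 7.31,
--         'N' : 6.95,
--         'S' : 6.28,
--         'R' : 6.02,
--         'H' : 5.92,
--         'D' : 4.32,
--         'L' : 3.98,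
--         'U' : 2.88,
--         'C' : 2.71,
--         'M' : 2.61,
--         'F' : 2.30,
--         'Y' : 2.11,
--         'W' : 2.09,
--         'G' : 2.03,
--         'P' : 1.82,
--         'B' : 1.49,
--         'V' : 1.11,
--         'K' : 0.69,
--         'X' : 0.17,
--         'Q' : 0.11,
--         'J' : 0.10,
--         'Z' : 0.07,
--         'e' : 12.0,
--         't' : 9.10,
--         'a' : 8.12,
--         'o' : 7.68,
--         'i' : 7.31,
--         'n' : 6.95,
--         's' : 6.28,
--         'r' : 6.02,
--         'h' : 5.92,
--         'd' : 4.32,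
--         'l' : 3.98,
--         'u' : 2.88,
--         'c' : 2.71,
--         'm' : 2.61,
--         'f' : 2.30,
--         'y' : 2.11,
--         'w' : 2.09,
--         'g' : 2.03,
--         'p' : 1.82,
--         'b' : 1.49,
--         'v' : 1.11,
--         'k' : 0.69,
--         'x' : 0.17,
--         'q' : 0.11,
--         'j' : 0.10,
--         'z' : 0.07,
--     }
--     return int(switcher.get(argument, 0))
--
-- def getBestXOR(stringA):
--     maxval = [0, 0, 0, 0, 0, 0, 0, 0, 0, 0, 0]
--     bestStr = ["", "", "", "", "", "", "", "", "", "", ""]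
--     for i in range(32, 127):
--         stringB = chr(i)*(len(stringA))
--         result = (XORtwoSTRs(stringA,stringB))
--         score = 0
--         for j in range(0, len(result)):
--             score += scorer(result[j])
--         for j in range(0, len(maxval)):
--             if(score > maxval[j]):
--                 tempScr = score
--                 tempStr = result
--                 for k in range(j, len(maxval)):
--                     temp = maxval[k]
--                     maxval[k] = tempScr
--                     tempScr = temp
--                     temp = bestStr[k]
--                     bestStr[k] = tempStr
--                     tempStr = temp
--                 break
--     return bestStr
-- ===== SOURCE B (Python) =====
-- # letter frequency scores (truncated to int), indexed A..Z
-- SCORES = [8, 1, 2, 4, 12, 2, 2, 5, 7, 0, 0, 3, 2, 6, 7, 1, 0, 6, 6, 9, 2, 1, 2, 0, 2, 0]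
--
-- def getBestXOR(stringA):
--     codes = [ord(c) for c in stringA]
--     cands = []
--     for key in range(32, 127):
--         decoded = [c ^ key for c in codes]
--         score = sum(SCORES[(b | 32) - 97] if 97 <= (b | 32) <= 122 else 0 for b in decoded)
--         if score > 0:
--             cands.append((score, ''.join(chr(b) for b in decoded)))
--     cands.sort(key=lambda p: -p[0])
--     top = [s for _, s in cands[:11]]
--     return top + [''] * (11 - len(top))
-- ===== Notes on version B (the rewrite author's own statement) =====
-- stated objective: simpler
-- what changed: B decodes via byte codes built once (join of chr's instead of per-character string += and per-character dict lookups) with an indexed A..Z frequency table, and replaces A's per-key shifting insertion into two parallel fixed-size-11 arrays with collecting every positive-scoring candidate and doing one stable descending sort, then slicing the top 11 and padding with empty strings.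
import Mathlib
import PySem

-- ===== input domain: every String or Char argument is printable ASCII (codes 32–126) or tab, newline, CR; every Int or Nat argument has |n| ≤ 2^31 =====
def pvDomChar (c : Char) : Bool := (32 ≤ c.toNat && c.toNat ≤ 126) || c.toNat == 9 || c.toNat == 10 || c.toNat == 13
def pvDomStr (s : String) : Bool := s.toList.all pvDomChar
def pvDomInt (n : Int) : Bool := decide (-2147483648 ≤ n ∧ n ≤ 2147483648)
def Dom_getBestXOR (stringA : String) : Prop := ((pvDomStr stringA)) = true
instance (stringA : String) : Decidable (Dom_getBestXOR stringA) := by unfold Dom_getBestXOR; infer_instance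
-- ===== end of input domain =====

-- B works on byte codes with an indexed A..Z frequency table and collects all positive-scoring
-- candidates for one stable sort + slice, instead of A's per-key shifting insertion into two
-- parallel fixed-size-11 arrays driven by a character-keyed dictionary (objective: simpler).

-- ===== PORT A =====
-- helper XORtwoSTRs of Source A; string built char by char as in the Python loop.
-- The getD default is never used on the inputs the caller passes (b always has a's length).
def XORtwoSTRs (a b : String) : String :=
  String.ofList ((List.range a.toList.length).foldl
    (fun acc i => acc ++ [Char.ofNat ((a.toList.getD i ' ').toNat ^^^ (b.toList.getD i ' ').toNat)]) [])

-- helper scorer of Source A: the Python dict (distinct keys) as an association list; the float values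
-- appear already truncated by the int() the Python applies to the looked-up value, so the ints are exact.
def scorerList : List (Char × Int) :=
  [('E',12),('T',9),('A',8),('O',7),('I',7),('N',6),('S',6),('R',6),('H',5),('D',4),
   ('L',3),('U',2),('C',2),('M',2),('F',2),('Y',2),('W',2),('G',2),('P',1),('B',1),
   ('V',1),('K',0),('X',0),('Q',0),('J',0),('Z',0),
   ('e',12),('t',9),('a',8),('o',7),('i',7),('n',6),('s',6),('r',6),('h',5),('d',4),
   ('l',3),('u',2),('c',2),('m',2),('f',2),('y',2),('w',2),('g',2),('p',1),('b',1),
   ('v',1),('k',0),('x',0),('q',0),('j',0),('z',0)]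

def scorer (argument : Char) : Int := (scorerList.lookup argument).getD 0

-- the inner 'for k in range(j, len(maxval))' shifting loop of A: place p, carry each old entry one
-- slot right, the value shifted out of the last slot is dropped
def shiftInA (p : Int × String) : List (Int × String) → List (Int × String)
  | [] => []
  | q :: qs => p :: shiftInA q qs

-- the 'for j in range(0, len(maxval))' scan with its break; maxval/bestStr kept as one list of pairs
def placeA (p : Int × String) : List (Int × String) → List (Int × String)
  | [] => []
  | q :: qs => if p.1 > q.1 then shiftInA p (q :: qs) else q :: placeA p qs

def getBestXOR (stringA : String) : List String :=
  ((PySem.List.pyRange 32 127 1).foldl (fun st i =>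
      let stringB := String.ofList (List.replicate stringA.toList.length (Char.ofNat i.toNat))
      let result := XORtwoSTRs stringA stringB
      let score := result.toList.foldl (fun acc c => acc + scorer c) 0
      placeA (score, result) st)
    (List.replicate 11 ((0 : Int), ""))).map Prod.snd

-- ===== PORT B =====
-- Source B's SCORES table, indexed by letter position A..Z
def pvScoresB : List Int :=
  [8, 1, 2, 4, 12, 2, 2, 5, 7, 0, 0, 3, 2, 6, 7, 1, 0, 6, 6, 9, 2, 1, 2, 0, 2, 0]

-- Source B's per-byte score: SCORES[(b|32)-97] guarded by the letter-range test (index always in range)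
def pvScoreByte (b : Nat) : Int :=
  let l := b ||| 32
  if 97 ≤ l ∧ l ≤ 122 then pvScoresB.getD (l - 97) 0 else 0

def getBestXOR_alt (stringA : String) : List String :=
  let codes := stringA.toList.map Char.toNat
  let cands := (PySem.List.pyRange 32 127 1).foldl (fun acc key =>
      -- keys of range(32,127) are nonnegative, so .toNat is exact for 'c ^ key'
      let decoded := codes.map (fun c => c ^^^ key.toNat)
      let score := (decoded.map pvScoreByte).sum
      if score > 0 then acc ++ [(score, String.ofList (decoded.map Char.ofNat))] else acc) []
  let top := ((PySem.List.sorted cands (fun p => -p.1)).take 11).map Prod.snd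
  top ++ List.replicate (11 - top.length) ""

-- ===== PRECONDITION & SPEC =====
def Spec_getBestXOR (stringA : String) (out : List String) : Prop := out = getBestXOR_alt stringA
instance (stringA : String) (out : List String) : Decidable (Spec_getBestXOR stringA out) := by unfold Spec_getBestXOR; infer_instance

-- ===== CLAIM (what is proved, stated in full; the proofs are below) =====
def Claim_equal_getBestXOR : Prop := ∀ (stringA : String), Dom_getBestXOR stringA → Spec_getBestXOR stringA (getBestXOR stringA)

-- ===== LEMMAS AND PROOFS =====

-- the insertion order used by B's sort key (fun p => -p.1)
def relDesc (a b : Int × String) : Bool := decide ((-a.1 : Int) < -b.1)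

-- a list truncated/padded to length n with the (0, "") filler A's arrays start from
def pad (n : Nat) (l : List (Int × String)) : List (Int × String) :=
  l.take n ++ List.replicate (n - l.length) ((0 : Int), "")

theorem pad_zero (l : List (Int × String)) : pad 0 l = [] := by
  simp [pad]

theorem pad_nil (n : Nat) : pad n [] = List.replicate n ((0 : Int), "") := by
  simp [pad]

theorem pad_cons (n : Nat) (q : Int × String) (l : List (Int × String)) :
    pad (n + 1) (q :: l) = q :: pad n l := by
  simp [pad]

theorem length_pad (n : Nat) (l : List (Int × String)) : (pad n l).length = n := by
  simp [pad]; omega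

theorem take_pad (k n : Nat) (h : k ≤ n) (l : List (Int × String)) :
    (pad n l).take k = pad k l := by
  induction l generalizing k n with
  | nil =>
    rw [pad_nil, pad_nil, List.take_replicate, Nat.min_eq_left h]
  | cons q qs ih =>
    cases n with
    | zero =>
      have hk : k = 0 := by omega
      subst hk
      simp [pad_zero]
    | succ m =>
      cases k with
      | zero => simp [pad_zero]
      | succ j =>
        rw [pad_cons, pad_cons, List.take_succ_cons, ih j m (by omega)]

theorem mem_pad (q : Int × String) (n : Nat) (l : List (Int × String)) (h : q ∈ pad n l) :
    q ∈ l ∨ q = ((0 : Int), "") := by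
  rcases List.mem_append.mp h with h' | h'
  · exact Or.inl (List.mem_of_mem_take h')
  · exact Or.inr (List.eq_of_mem_replicate h')

theorem shiftInA_eq (p : Int × String) (l : List (Int × String)) :
    shiftInA p l = (p :: l).take l.length := by
  induction l generalizing p with
  | nil => rfl
  | cons q qs ih => simp [shiftInA, ih q]

theorem placeA_eq (p : Int × String) (l : List (Int × String)) :
    placeA p l = (PySem.List.insertBy relDesc p l).take l.length := by
  induction l with
  | nil => rfl
  | cons q qs ih =>
    by_cases h : q.1 < p.1
    · have hrel : relDesc p q = true := by simp [relDesc]; omega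
      simp [placeA, PySem.List.insertBy, h, hrel, shiftInA_eq]
    · have hrel : relDesc p q = false := by simp [relDesc]; omega
      simp [placeA, PySem.List.insertBy, h, hrel, ih]

theorem placeA_noop (p : Int × String) (l : List (Int × String))
    (h : ∀ q ∈ l, ¬ q.1 < p.1) : placeA p l = l := by
  induction l with
  | nil => rfl
  | cons q qs ih =>
    have hq := h q (by simp)
    simp only [placeA, if_neg (by omega : ¬ p.1 > q.1)]
    rw [ih (fun r hr => h r (by simp [hr]))]

theorem ins_pad (p : Int × String) (hp : 0 < p.1) (n : Nat) (l : List (Int × String)) :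
    (PySem.List.insertBy relDesc p (pad n l)).take n = pad n (PySem.List.insertBy relDesc p l) := by
  induction l generalizing n with
  | nil =>
    cases n with
    | zero => simp [PySem.List.insertBy, pad]
    | succ m =>
      have hrel : relDesc p ((0 : Int), "") = true := by simp [relDesc]; omega
      rw [pad_nil]
      have h1 : PySem.List.insertBy relDesc p (List.replicate (m + 1) ((0 : Int), ""))
          = p :: List.replicate (m + 1) ((0 : Int), "") := by
        rw [List.replicate_succ]
        simp [PySem.List.insertBy, hrel]
      have h2 : PySem.List.insertBy relDesc p ([] : List (Int × String)) = [p] := by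
        simp [PySem.List.insertBy]
      rw [h1, h2, List.take_succ_cons, List.take_replicate, Nat.min_eq_left (by omega : m ≤ m + 1)]
      simp [pad]
  | cons q qs ih =>
    cases n with
    | zero => simp [pad_zero, PySem.List.insertBy]
    | succ m =>
      rw [pad_cons]
      by_cases h : relDesc p q = true
      · have h1 : PySem.List.insertBy relDesc p (q :: pad m qs) = p :: q :: pad m qs := by
          simp [PySem.List.insertBy, h]
        have h2 : PySem.List.insertBy relDesc p (q :: qs) = p :: q :: qs := by
          simp [PySem.List.insertBy, h]
        rw [h1, h2, List.take_succ_cons, pad_cons]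
        congr 1
        rw [← pad_cons m q qs, take_pad m (m + 1) (by omega)]
      · have h1 : PySem.List.insertBy relDesc p (q :: pad m qs)
            = q :: PySem.List.insertBy relDesc p (pad m qs) := by
          simp [PySem.List.insertBy, h]
        have h2 : PySem.List.insertBy relDesc p (q :: qs)
            = q :: PySem.List.insertBy relDesc p qs := by
          simp [PySem.List.insertBy, h]
        rw [h1, h2, List.take_succ_cons, pad_cons, ih m]

theorem loop_eq (cs : List (Int × String)) : ∀ (acc : List (Int × String)),
    (∀ p ∈ cs, 0 ≤ p.1) → (∀ q ∈ acc, 0 ≤ q.1) →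
    cs.foldl (fun st p => placeA p st) (pad 11 acc)
      = pad 11 ((cs.filter (fun p => decide (0 < p.1))).foldl
          (fun a x => PySem.List.insertBy relDesc x a) acc) := by
  induction cs with
  | nil => intro acc _ _; rfl
  | cons p cs ih =>
    intro acc hcs hacc
    have hp : 0 ≤ p.1 := hcs p (by simp)
    by_cases h : 0 < p.1
    · have step : placeA p (pad 11 acc) = pad 11 (PySem.List.insertBy relDesc p acc) := by
        rw [placeA_eq, length_pad, ins_pad p h]
      have hacc' : ∀ q ∈ PySem.List.insertBy relDesc p acc, 0 ≤ q.1 := by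
        intro q hq
        rcases (PySem.List.mem_insertBy relDesc p q acc).mp hq with rfl | hq'
        · exact hp
        · exact hacc q hq'
      simp only [List.foldl_cons, step, List.filter_cons, decide_eq_true_eq, if_pos h]
      exact ih (PySem.List.insertBy relDesc p acc) (fun r hr => hcs r (by simp [hr])) hacc'
    · have step : placeA p (pad 11 acc) = pad 11 acc := by
        apply placeA_noop
        intro q hq
        rcases mem_pad q 11 acc hq with hq' | rfl
        · have := hacc q hq'; omega
        · simp; omega
      simp only [List.foldl_cons, step, List.filter_cons, decide_eq_true_eq, if_neg h]
      exact ih acc (fun r hr => hcs r (by simp [hr])) hacc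

theorem foldl_scorer_nonneg (l : List Char) : ∀ (a : Int), 0 ≤ a →
    0 ≤ l.foldl (fun acc c => acc + scorer c) a := by
  have hsc : ∀ c : Char, 0 ≤ scorer c := by
    intro c
    have : ∀ (t : List (Char × Int)), (∀ p ∈ t, 0 ≤ p.2) → 0 ≤ (t.lookup c).getD 0 := by
      intro t ht
      induction t with
      | nil => simp
      | cons p t ih =>
        by_cases h : c == p.1
        · simpa [List.lookup, h] using ht p (by simp)
        · simp only [List.lookup, h]
          exact ih (fun r hr => ht r (by simp [hr]))
    exact this scorerList (by decide)
  induction l with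
  | nil => intro a ha; simpa
  | cons c l ih =>
    intro a ha
    rw [List.foldl_cons]
    exact ih (a + scorer c) (by have := hsc c; omega)

-- both ports run a per-key candidate computation g; A's arrays-vs-B's sort equivalence,
-- generalized over that computation
theorem main_eq (g : Int → Int × String) (hg : ∀ i, 0 ≤ (g i).1) (ks : List Int) :
    (ks.foldl (fun st i => placeA (g i) st) (List.replicate 11 ((0 : Int), ""))).map Prod.snd
      = ((PySem.List.sorted
            (ks.foldl (fun acc i => if (g i).1 > 0 then acc ++ [g i] else acc) [])
            (fun p => -p.1)).take 11).map Prod.snd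
        ++ List.replicate
            (11 - (((PySem.List.sorted
                (ks.foldl (fun acc i => if (g i).1 > 0 then acc ++ [g i] else acc) [])
                (fun p => -p.1)).take 11).map Prod.snd).length) "" := by
  have hcands : ks.foldl (fun acc i => if (g i).1 > 0 then acc ++ [g i] else acc) []
      = (ks.map g).filter (fun p => decide (0 < p.1)) := by
    have h1 : (fun (acc : List (Int × String)) i => if (g i).1 > 0 then acc ++ [g i] else acc)
        = (fun acc i => if (fun j => decide (0 < (g j).1)) i = true then acc ++ [g i] else acc) := by
      funext a x
      by_cases h : 0 < (g x).1 <;> simp [h]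
    rw [h1, PySem.List.foldl_append_if (fun j => decide (0 < (g j).1)) g ks []]
    simp [List.filter_map, Function.comp_def]
  have hsort : PySem.List.sorted ((ks.map g).filter (fun p => decide (0 < p.1))) (fun p => -p.1)
      = ((ks.map g).filter (fun p => decide (0 < p.1))).foldl
          (fun a x => PySem.List.insertBy relDesc x a) [] := by
    rw [PySem.List.sorted_eq_foldl_insertBy]
    rfl
  have hfold : ks.foldl (fun st i => placeA (g i) st) (List.replicate 11 ((0 : Int), ""))
      = (ks.map g).foldl (fun st p => placeA p st) (pad 11 []) := by
    rw [List.foldl_map]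
    rfl
  rw [hcands, hsort, hfold,
    loop_eq (ks.map g) [] (by intro p hp; rcases List.mem_map.mp hp with ⟨i, _, rfl⟩; exact hg i) (by simp)]
  set S := ((ks.map g).filter (fun p => decide (0 < p.1))).foldl (fun a x => PySem.List.insertBy relDesc x a) [] with hS
  rw [pad, List.map_append, List.map_replicate]
  congr 1
  simp
  omega

-- (range l.length).map over getD is just map (bridges A's index loop to B's comprehension)
theorem map_range_getD {β : Type} (l : List Char) (d : Char) (g : Char → β) :
    (List.range l.length).map (fun i => g (l.getD i d)) = l.map g := by
  induction l with
  | nil => rfl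
  | cons a t ih =>
    rw [List.length_cons, List.range_succ_eq_map, List.map_cons, List.map_map]
    simpa using congrArg (List.cons (g a)) ih

-- scorer via the dict equals B's byte-indexed table on every byte < 128
theorem scorer_eq_byte : ∀ b : Fin 128, scorer (Char.ofNat b.val) = pvScoreByte b.val := by
  decide

-- A's XOR of a string with a repeated key char, as B computes it
theorem XOR_replicate (a : String) (k : Char) :
    XORtwoSTRs a (String.ofList (List.replicate a.toList.length k)) =
    String.ofList (a.toList.map (fun c => Char.ofNat (c.toNat ^^^ k.toNat))) := by
  unfold XORtwoSTRs
  rw [PySem.List.foldl_append_singleton_eq_map, List.nil_append]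
  congr 1
  have hrep : ∀ i ∈ List.range a.toList.length,
      ((String.ofList (List.replicate a.toList.length k)).toList.getD i ' ') = k := by
    intro i hi
    have hi' := List.mem_range.mp hi
    have hlen : i < a.length := by rw [← String.length_toList]; exact hi'
    simp [List.getD_eq_getElem?_getD, hlen]
  calc (List.range a.toList.length).map
        (fun i => Char.ofNat ((a.toList.getD i ' ').toNat ^^^
          ((String.ofList (List.replicate a.toList.length k)).toList.getD i ' ').toNat))
      = (List.range a.toList.length).map
        (fun i => Char.ofNat ((a.toList.getD i ' ').toNat ^^^ k.toNat)) := by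
        apply List.map_congr_left
        intro i hi
        rw [hrep i hi]
    _ = a.toList.map (fun c => Char.ofNat (c.toNat ^^^ k.toNat)) :=
        map_range_getD a.toList ' ' (fun c => Char.ofNat (c.toNat ^^^ k.toNat))

set_option maxHeartbeats 1000000 in
theorem getBestXOR_spec_aux (stringA : String) (hDom : Dom_getBestXOR stringA) :
    getBestXOR stringA = getBestXOR_alt stringA := by
  have hdom : ∀ c ∈ stringA.toList, c.toNat < 128 := by
    intro c hc
    have := List.all_eq_true.mp hDom c hc
    simp only [pvDomChar, Bool.or_eq_true, Bool.and_eq_true, decide_eq_true_eq, beq_iff_eq] at this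
    omega
  -- the per-key candidate pair, in A's form
  set g : Int → Int × String := fun i =>
    let stringB := String.ofList (List.replicate stringA.toList.length (Char.ofNat i.toNat))
    let result := XORtwoSTRs stringA stringB
    ((result.toList.foldl (fun acc c => acc + scorer c) 0 : Int), result) with hg
  -- B's fold body agrees with A's candidate computation on every key of range(32,127)
  have hkey : ∀ key ∈ PySem.List.pyRange 32 127 1,
      ∀ acc : List (Int × String),
      (if (((stringA.toList.map Char.toNat).map (fun c => c ^^^ key.toNat)).map pvScoreByte).sum > 0
        then acc ++ [((((stringA.toList.map Char.toNat).map (fun c => c ^^^ key.toNat)).map pvScoreByte).sum,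
          String.ofList (((stringA.toList.map Char.toNat).map (fun c => c ^^^ key.toNat)).map Char.ofNat))]
        else acc)
      = (if (g key).1 > 0 then acc ++ [g key] else acc) := by
    intro key hkeymem acc
    have hkr := (PySem.List.mem_pyRange_one).mp hkeymem
    have hklt : key.toNat < 128 := by omega
    have hknat : (Char.ofNat key.toNat).toNat = key.toNat := by
      unfold Char.ofNat
      rw [dif_pos (Or.inl (by omega) : Nat.isValidChar key.toNat)]
      rfl
    have hxor : XORtwoSTRs stringA
        (String.ofList (List.replicate stringA.toList.length (Char.ofNat key.toNat)))
        = String.ofList (stringA.toList.map (fun c => Char.ofNat (c.toNat ^^^ key.toNat))) := by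
      rw [XOR_replicate stringA (Char.ofNat key.toNat), hknat]
    have hpair : g key = ((((stringA.toList.map Char.toNat).map (fun c => c ^^^ key.toNat)).map pvScoreByte).sum,
        String.ofList (((stringA.toList.map Char.toNat).map (fun c => c ^^^ key.toNat)).map Char.ofNat)) := by
      rw [hg]
      simp only [hxor]
      rw [Prod.mk.injEq]
      refine ⟨?_, ?_⟩
      · -- scores agree pointwise: every decoded byte is < 128
        rw [PySem.List.foldl_add, String.toList_ofList, List.map_map, List.map_map, List.map_map]
        simp only [Int.zero_add]
        congr 1
        apply List.map_congr_left
        intro c hc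
        have hb : c.toNat ^^^ key.toNat < 128 := Nat.xor_lt_two_pow (n := 7) (hdom c hc) hklt
        exact scorer_eq_byte ⟨c.toNat ^^^ key.toNat, hb⟩
      · rw [List.map_map, List.map_map]
        rfl
    rw [hpair]
  -- rewrite B's fold through hkey, then apply the array-vs-sort equivalence
  unfold getBestXOR getBestXOR_alt
  simp only
  rw [PySem.List.foldl_congr_mem' (g := fun acc key => if (g key).1 > 0 then acc ++ [g key] else acc)
    (h := hkey)]
  exact main_eq g (fun i => foldl_scorer_nonneg _ 0 le_rfl) (PySem.List.pyRange 32 127 1)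

-- ===== VERDICT (by name: the statement is the Claim_ definition above) =====
theorem getBestXOR_spec : Claim_equal_getBestXOR := by
  intro stringA hDom
  exact getBestXOR_spec_aux stringA hDom
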